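-- pv_equiv track=rewrite | github.com/u199327/Tennis-XrAI | AI_Agent/src/utils/rally_analysis_utils.py | split_by_shot_type
-- ===== SOURCE A (Python) =====
-- def split_by_shot_type(sequence):
--     shot_types = set("fbrsvzopuylmhijktq")
--     segments = []
--     current = ""
--
--     for char in sequence:
--         if char in shot_types:
--             if current:
--                 segments.append(current)
--             current = char
--         else:
--             current += char
--     if current:
--         segments.append(current)
--     return segments
-- ===== SOURCE B (Python) =====
-- def split_by_shot_type(sequence):
--     shot_types = frozenset("fbrsvzopuylmhijktq")
--     segments = []
--     i, n = 0, len(sequence)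
--     while i < n:
--         j = i + 1
--         while j < n and sequence[j] not in shot_types:
--             j += 1
--         segments.append(sequence[i:j])
--         i = j
--     return segments
-- ===== Notes on version B (the rewrite author's own statement) =====
-- stated objective: alternative
-- what changed: Replaces A's accumulate-and-flush state machine (a mutable 'current' buffer flushed on each shot-type char and once at the end) with an index-based two-pointer scan: each segment is the slice from its start to the next shot-type character, taken directly from the input.
import Mathlib
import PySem

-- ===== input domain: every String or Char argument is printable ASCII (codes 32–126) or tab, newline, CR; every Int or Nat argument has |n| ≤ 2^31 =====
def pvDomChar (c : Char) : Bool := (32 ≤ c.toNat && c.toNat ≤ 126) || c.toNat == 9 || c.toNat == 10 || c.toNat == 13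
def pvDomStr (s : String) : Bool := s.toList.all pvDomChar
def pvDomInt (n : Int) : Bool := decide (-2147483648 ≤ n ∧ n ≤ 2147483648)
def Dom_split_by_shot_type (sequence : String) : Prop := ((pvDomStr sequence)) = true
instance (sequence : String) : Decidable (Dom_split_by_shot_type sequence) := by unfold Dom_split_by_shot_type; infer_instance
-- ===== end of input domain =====

-- B replaces A's accumulate-and-flush state machine with a recursive greedy scan
-- (head char + maximal following non-shot run per segment); objective: alternative
-- (same O(n) cost, different shape).

-- ===== PORT A =====
-- A: fold over the characters carrying (segments, current); a shot-type char
-- flushes the non-empty current and starts a new one; a final flush at the end.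
def split_by_shot_type (sequence : String) : List String :=
  let shot_types : PySem.Set Char := PySem.Set.ofList "fbrsvzopuylmhijktq".toList
  let st := sequence.toList.foldl
    (fun (p : List (List Char) × List Char) char =>
      if char ∈ shot_types then
        ((if p.2 ≠ [] then p.1 ++ [p.2] else p.1), [char])
      else
        (p.1, p.2 ++ [char]))
    ([], [])
  (if st.2 ≠ [] then st.1 ++ [st.2] else st.1).map String.mk

-- ===== PORT B =====
-- Source B's inner while loop: first index ≥ j holding a shot-type char (or the length)
def pvNext (shot chars : List Char) (j : Nat) : Nat :=
  if h : j < chars.length then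
    if chars[j] ∈ shot then j else pvNext shot chars (j + 1)
  else j
  termination_by chars.length - j

theorem le_pvNext (shot chars : List Char) (j : Nat) : j ≤ pvNext shot chars j := by
  rw [pvNext.eq_def]
  split
  · split
    · exact le_refl j
    · exact Nat.le_trans (Nat.le_succ j) (le_pvNext shot chars (j + 1))
  · exact le_refl j
  termination_by chars.length - j

-- Source B's outer while loop: emit the slice sequence[i:j] and continue at j.
-- (the Python slice sequence[i:j] with 0 ≤ i ≤ j is exactly (drop i).take (j - i))
def pvGo (shot chars : List Char) (i : Nat) : List (List Char) :=
  if i < chars.length then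
    let j := pvNext shot chars (i + 1)
    ((chars.drop i).take (j - i)) :: pvGo shot chars j
  else []
  termination_by chars.length - i
  decreasing_by
    have := le_pvNext shot chars (i + 1)
    omega

def split_by_shot_type_alt (sequence : String) : List String :=
  (pvGo "fbrsvzopuylmhijktq".toList sequence.toList 0).map String.mk

-- ===== PRECONDITION & SPEC =====
def Spec_split_by_shot_type (sequence : String) (out : List String) : Prop := out = split_by_shot_type_alt sequence
instance (sequence : String) (out : List String) : Decidable (Spec_split_by_shot_type sequence out) := by unfold Spec_split_by_shot_type; infer_instance

-- ===== CLAIM (what is proved, stated in full; the proofs are below) =====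
def Claim_equal_split_by_shot_type : Prop := ∀ (sequence : String), Dom_split_by_shot_type sequence → Spec_split_by_shot_type sequence (split_by_shot_type sequence)

-- ===== LEMMAS AND PROOFS =====

-- length of the leading run of non-shot chars (proof-side view of pvNext)
def pvRunLen (shot : List Char) : List Char → Nat
  | [] => 0
  | c :: cs => if c ∈ shot then 0 else pvRunLen shot cs + 1

-- suffix-recursion view of B: head char + its non-shot run per segment
def pvSuffix (shot : List Char) : List Char → List (List Char)
  | [] => []
  | c :: cs =>
    let i := pvRunLen shot cs
    (c :: cs.take i) :: pvSuffix shot (cs.drop i)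
  termination_by l => l.length
  decreasing_by simp

-- the segments A still produces from state 'cur' on the remaining input
def pvTail (shot : List Char) (cur : List Char) : List Char → List (List Char)
  | [] => if cur ≠ [] then [cur] else []
  | c :: cs =>
    if c ∈ shot then (if cur ≠ [] then [cur] else []) ++ pvTail shot [c] cs
    else pvTail shot (cur ++ [c]) cs

theorem pvRunLen_take (shot cs : List Char) :
    cs.take (pvRunLen shot cs) = cs.takeWhile (fun c => !decide (c ∈ shot)) := by
  induction cs with
  | nil => rfl
  | cons c cs ih =>
    simp only [pvRunLen, List.takeWhile_cons]
    by_cases h : c ∈ shot <;> simp [h, ih]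

theorem pvRunLen_drop (shot cs : List Char) :
    cs.drop (pvRunLen shot cs) = cs.dropWhile (fun c => !decide (c ∈ shot)) := by
  induction cs with
  | nil => rfl
  | cons c cs ih =>
    simp only [pvRunLen, List.dropWhile_cons]
    by_cases h : c ∈ shot <;> simp [h, ih]

theorem pvSuffix_nil (shot : List Char) : pvSuffix shot [] = [] := by
  rw [pvSuffix.eq_def]

theorem pvSuffix_cons (shot : List Char) (c : Char) (cs : List Char) :
    pvSuffix shot (c :: cs) =
      (c :: cs.takeWhile (fun x => !decide (x ∈ shot))) ::
        pvSuffix shot (cs.dropWhile (fun x => !decide (x ∈ shot))) := by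
  rw [pvSuffix.eq_def]
  simp [pvRunLen_take, pvRunLen_drop]

theorem foldl_flush (shot : List Char) :
    ∀ (cs : List Char) (segs : List (List Char)) (cur : List Char),
      (if (cs.foldl (fun (p : List (List Char) × List Char) char =>
              if char ∈ shot then ((if p.2 ≠ [] then p.1 ++ [p.2] else p.1), [char])
              else (p.1, p.2 ++ [char])) (segs, cur)).2 ≠ [] then
          (cs.foldl (fun (p : List (List Char) × List Char) char =>
              if char ∈ shot then ((if p.2 ≠ [] then p.1 ++ [p.2] else p.1), [char])
              else (p.1, p.2 ++ [char])) (segs, cur)).1 ++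
            [(cs.foldl (fun (p : List (List Char) × List Char) char =>
              if char ∈ shot then ((if p.2 ≠ [] then p.1 ++ [p.2] else p.1), [char])
              else (p.1, p.2 ++ [char])) (segs, cur)).2]
        else
          (cs.foldl (fun (p : List (List Char) × List Char) char =>
              if char ∈ shot then ((if p.2 ≠ [] then p.1 ++ [p.2] else p.1), [char])
              else (p.1, p.2 ++ [char])) (segs, cur)).1) = segs ++ pvTail shot cur cs := by
  intro cs
  induction cs with
  | nil =>
    intro segs cur
    simp only [List.foldl_nil, pvTail]
    split <;> simp
  | cons c cs ih =>
    intro segs cur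
    by_cases h : c ∈ shot
    · simp only [List.foldl_cons, h, if_true, pvTail]
      rw [ih]
      split <;> simp
    · simp only [List.foldl_cons, h, if_false, pvTail]
      exact ih segs (cur ++ [c])

theorem pvTail_go (shot : List Char) :
    ∀ (cs cur : List Char), cur ≠ [] →
      pvTail shot cur cs =
        (cur ++ cs.takeWhile (fun c => !decide (c ∈ shot))) ::
          pvSuffix shot (cs.dropWhile (fun c => !decide (c ∈ shot))) := by
  intro cs
  induction cs with
  | nil =>
    intro cur hcur
    simp [pvTail, pvSuffix_nil, hcur]
  | cons c cs ih =>
    intro cur hcur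
    simp only [pvTail, List.takeWhile_cons, List.dropWhile_cons]
    by_cases h : c ∈ shot
    · simp only [h, if_true, hcur, ne_eq, not_false_iff, decide_true, Bool.not_true,
        Bool.false_eq_true, if_false]
      rw [ih [c] (by simp), pvSuffix_cons]
      simp
    · simp only [h, if_false, decide_false, Bool.not_false, if_true]
      rw [ih (cur ++ [c]) (by simp)]
      simp

theorem pvTail_nil_eq_go (shot : List Char) (cs : List Char) :
    pvTail shot [] cs = pvSuffix shot cs := by
  cases cs with
  | nil => simp [pvTail, pvSuffix_nil]
  | cons c cs =>
    have key : pvTail shot [c] cs = pvSuffix shot (c :: cs) := by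
      rw [pvTail_go shot cs [c] (by simp), pvSuffix_cons]
      simp
    simp only [pvTail]
    by_cases h : c ∈ shot
    · simpa [h] using key
    · simpa [h] using key


theorem pvNext_eq_runLen (shot chars : List Char) (j : Nat) :
    pvNext shot chars j = j + pvRunLen shot (chars.drop j) := by
  rw [pvNext.eq_def]
  split
  · rename_i h
    rw [List.drop_eq_getElem_cons h]
    simp only [pvRunLen]
    split
    · simp
    · rw [pvNext_eq_runLen shot chars (j + 1)]
      omega
  · rename_i h
    rw [List.drop_eq_nil_of_le (by omega)]
    simp [pvRunLen]
  termination_by chars.length - j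

theorem pvGo_eq_pvSuffix (shot chars : List Char) (i : Nat) :
    pvGo shot chars i = pvSuffix shot (chars.drop i) := by
  rw [pvGo.eq_def]
  split
  · rename_i h
    rw [List.drop_eq_getElem_cons h, pvSuffix]
    have hnext := pvNext_eq_runLen shot chars (i + 1)
    simp only [hnext]
    rw [show i + 1 + pvRunLen shot (chars.drop (i + 1)) - i
          = pvRunLen shot (chars.drop (i + 1)) + 1 from by omega,
        List.take_succ_cons,
        pvGo_eq_pvSuffix shot chars (i + 1 + pvRunLen shot (chars.drop (i + 1))),
        Nat.add_comm (i + 1), ← List.drop_drop]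
    simp only [List.drop_drop]
    congr 3
    omega
  · rename_i h
    rw [List.drop_eq_nil_of_le (by omega), pvSuffix]
  termination_by chars.length - i
  decreasing_by
    have := le_pvNext shot chars (i + 1)
    omega
-- ===== VERDICT (by name: the statement is the Claim_ definition above) =====
theorem split_by_shot_type_spec : Claim_equal_split_by_shot_type := by
  intro sequence _
  show _ = _
  unfold split_by_shot_type split_by_shot_type_alt
  have hset : PySem.Set.ofList "fbrsvzopuylmhijktq".toList =
      "fbrsvzopuylmhijktq".toList := by decide
  simp only [hset]
  rw [foldl_flush "fbrsvzopuylmhijktq".toList sequence.toList [] [],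
    pvTail_nil_eq_go, pvGo_eq_pvSuffix]
  simp
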